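-- pv_equiv track=rewrite | github.com/Mangolan/system-monitoring-project | main.py | classify_overall_status
-- ===== SOURCE A (Python) =====
-- def classify_overall_status(issue_list):
--     severities = [issue["severity"] for issue in issue_list]
--
--     if "CRITICAL" in severities:
--         return "CRITICAL"
--     elif "CAUTION" in severities:
--         return "CAUTION"
--     else:
--         return "NORMAL"
-- ===== SOURCE B (Python) =====
-- _RANK = {"CAUTION": 1, "CRITICAL": 2}
-- _STATUS_TABLE = ["NORMAL", "CAUTION", "CRITICAL"]
--
-- def classify_overall_status(issue_list):
--     worst = max((_RANK.get(issue["severity"], 0) for issue in issue_list), default=0)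
--     return _STATUS_TABLE[worst]
-- ===== Notes on version B (the rewrite author's own statement) =====
-- stated objective: alternative
-- what changed: Replaces the build-a-severities-list-plus-ordered-membership-tests with an order-statistic reduction: each severity is mapped to a numeric rank, the maximum rank is taken, and the status is decoded from a table; correct because the string membership priority is exactly the max of the ranks.
import Mathlib
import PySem

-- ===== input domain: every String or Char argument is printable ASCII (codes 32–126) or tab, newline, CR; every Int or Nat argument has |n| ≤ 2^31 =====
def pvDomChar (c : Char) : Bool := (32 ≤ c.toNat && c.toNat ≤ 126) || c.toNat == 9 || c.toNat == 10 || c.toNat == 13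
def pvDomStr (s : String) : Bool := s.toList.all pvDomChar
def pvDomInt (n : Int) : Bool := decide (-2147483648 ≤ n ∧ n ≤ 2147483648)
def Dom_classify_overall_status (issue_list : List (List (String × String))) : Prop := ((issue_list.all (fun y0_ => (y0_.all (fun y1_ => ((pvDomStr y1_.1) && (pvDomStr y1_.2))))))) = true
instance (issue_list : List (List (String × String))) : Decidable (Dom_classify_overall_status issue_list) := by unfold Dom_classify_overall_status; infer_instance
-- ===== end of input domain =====

-- B replaces the list-build-plus-ordered-membership-tests with a max-of-ranks reduction decoded from a table; same O(n) cost.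

-- ===== PORT A =====
-- issue["severity"]: first-match association-list lookup; Pre_ guarantees the key is present (else Python raises KeyError)
def pySeverity (issue : List (String × String)) : String :=
  (((issue.find? (fun p => p.1 == "severity")).map Prod.snd).getD "")

def classify_overall_status (issue_list : List (List (String × String))) : String :=
  let severities := issue_list.map pySeverity
  if severities.contains "CRITICAL" then "CRITICAL"
  else if severities.contains "CAUTION" then "CAUTION"
  else "NORMAL"

-- ===== PORT B =====
-- _RANK.get(s, 0): two-entry dict lookup with default
def pvRank (s : String) : Nat :=
  if s == "CAUTION" then 1 else if s == "CRITICAL" then 2 else 0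

def classify_overall_status_alt (issue_list : List (List (String × String))) : String :=
  let worst := issue_list.foldl (fun w issue => max w (pvRank (pySeverity issue))) 0
  ["NORMAL", "CAUTION", "CRITICAL"].getD worst ""

-- ===== PRECONDITION & SPEC =====
-- Pre_ excludes issues lacking a "severity" key, on which Python A raises KeyError (B raises there too).
def Pre_classify_overall_status (issue_list : List (List (String × String))) : Prop :=
  (issue_list.all (fun issue => issue.any (fun p => p.1 == "severity"))) = true
instance (issue_list : List (List (String × String))) : Decidable (Pre_classify_overall_status issue_list) := by unfold Pre_classify_overall_status; infer_instance

def pvWitness_classify_overall_status : (List (List (String × String))) :=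
  [[("severity", "CAUTION")], [("severity", "NORMAL"), ("host", "a")]]

def Spec_classify_overall_status (issue_list : List (List (String × String))) (out : String) : Prop := out = classify_overall_status_alt issue_list
instance (issue_list : List (List (String × String))) (out : String) : Decidable (Spec_classify_overall_status issue_list out) := by unfold Spec_classify_overall_status; infer_instance

-- ===== CLAIM =====
def Claim_equal_classify_overall_status : Prop := ∀ (issue_list : List (List (String × String))), Dom_classify_overall_status issue_list → Pre_classify_overall_status issue_list → Spec_classify_overall_status issue_list (classify_overall_status issue_list)

-- ===== LEMMAS AND PROOFS =====
-- The fold's running maximum equals max of the start with the rank dictated by A's two membership tests.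
theorem classify_fold_max (l : List (List (String × String))) (a : Nat) :
    l.foldl (fun w issue => max w (pvRank (pySeverity issue))) a
      = max a (if (l.map pySeverity).contains "CRITICAL" then 2
               else if (l.map pySeverity).contains "CAUTION" then 1 else 0) := by
  induction l generalizing a with
  | nil => simp
  | cons x xs ih =>
      rw [List.foldl_cons, ih, List.map_cons, List.contains_cons, List.contains_cons]
      unfold pvRank
      rw [show (pySeverity x == "CRITICAL") = ("CRITICAL" == pySeverity x) from BEq.comm,
          show (pySeverity x == "CAUTION") = ("CAUTION" == pySeverity x) from BEq.comm]
      cases hxC : ("CRITICAL" == pySeverity x) <;>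
        cases hxK : ("CAUTION" == pySeverity x) <;>
          cases hC' : (xs.map pySeverity).contains "CRITICAL" <;>
            cases hK' : (xs.map pySeverity).contains "CAUTION" <;>
              simp <;>
                first
                | omega
                | exact absurd ((eq_of_beq hxC).trans (eq_of_beq hxK).symm) (by decide)

-- ===== VERDICT =====
theorem classify_overall_status_spec : Claim_equal_classify_overall_status := by
  intro l _ _
  unfold Spec_classify_overall_status classify_overall_status classify_overall_status_alt
  rw [classify_fold_max]
  cases hc : (l.map pySeverity).contains "CRITICAL" <;>
    cases hk : (l.map pySeverity).contains "CAUTION" <;> simp only [hc, hk] <;> rfl
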